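-- pv_equiv track=rewrite | github.com/ysenoh/programing | atcoder/regular084/d.py | f
-- ===== SOURCE A (Python) =====
-- import heapq
--
-- def sumOfDigits(n):
--     a = 0
--
--     while n > 0:
--         a += n%10
--         n //= 10
--
--     return a
--
-- def f(n):
--     while n%2 == 0:
--         n //= 2
--
--     while n%5 == 0:
--         n //= 5
--
--     vs = [None]*n
--     qs = []
--     x = sumOfDigits(n)
--
--     for i in range(1, min(n, 10)):
--         vs[i] = i
--         heapq.heappush(qs, (i, i))
--
--     while len(qs) > 0:
--         _, q = heapq.heappop(qs)
--         q2 = q*10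
--         v = vs[q]
--
--         for i in range(0, min(x-v, 10)):
--             q3 = (q2 + i)%n
--             v2 = v + i
--             v3 = vs[q3]
--
--             if v3 == None or v2 < v3:
--                 vs[q3] = v2
--                 heapq.heappush(qs, (v2, q3))
--
--             if q3 == 0 and v2 < x:
--                 x = v2
--
--     return x
-- ===== SOURCE B (Python) =====
-- def digitSum(n):
--     return 0 if n <= 0 else n % 10 + digitSum(n // 10)
--
-- def f(n):
--     # removing the factors 2 and 5 does not change the answer
--     while n % 2 == 0:
--         n //= 2
--     while n % 5 == 0:
--         n //= 5
--     cap = digitSum(n)        # n itself is a multiple, so cap bounds the answer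
--     dist = [cap + 1] * n     # cap + 1 = "not reached with anything useful yet"
--     dist[1 % n] = 1
--     # 0-1 BFS over residues:  r --0--> (10*r) % n,  r --1--> (r+1) % n.
--     # Deque built from two stacks: pop from `front`, cost-0 pushes go to the
--     # front, cost-1 pushes to the back.
--     front, back = [1 % n], []
--     while front or back:
--         if not front:
--             front = back[::-1]
--             back = []
--         r = front.pop()
--         d = dist[r]
--         t = r * 10 % n
--         if d < dist[t]:
--             dist[t] = d
--             front.append(t)
--         t = (r + 1) % n
--         if d + 1 < dist[t]:
--             dist[t] = d + 1
--             back.append(t)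
--     return dist[0]
-- ===== Notes on version B (the rewrite author's own statement) =====
-- stated objective: faster
-- what changed: Replaces A's heap-based Dijkstra over digit-append edges (cost = appended digit, branch-and-bound cap) by a 0-1 BFS over residues mod n (edge r->10r%n cost 0, r->r+1%n cost 1) using a deque built from two stacks, removing the priority queue entirely.
-- outside the precondition, e.g. on f(-3): A returns 0, B raises IndexError
import Mathlib
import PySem

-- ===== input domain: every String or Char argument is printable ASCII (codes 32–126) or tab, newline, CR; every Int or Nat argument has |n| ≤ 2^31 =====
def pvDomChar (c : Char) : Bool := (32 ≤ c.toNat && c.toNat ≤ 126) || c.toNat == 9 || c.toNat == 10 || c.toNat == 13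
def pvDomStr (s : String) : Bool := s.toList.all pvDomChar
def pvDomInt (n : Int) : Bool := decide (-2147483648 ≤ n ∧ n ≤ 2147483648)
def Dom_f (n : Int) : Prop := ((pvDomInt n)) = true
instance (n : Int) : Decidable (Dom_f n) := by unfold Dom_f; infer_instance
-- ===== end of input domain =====

-- B replaces A's heap-based Dijkstra over digit-append edges by a 0-1 BFS over
-- residues mod n (×10 = cost 0, +1 = cost 1) with a deque built from two stacks
-- (objective: faster — the priority queue disappears).


-- ===== PORT A =====

-- while n%2 == 0: n //= 2   (the `n ≠ 0` guard only makes the recursion total: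
-- Python diverges at n = 0, which Pre_f excludes)
def A_strip2 (n : Int) : Int :=
  if h : PySem.Int.mod n 2 = 0 ∧ n ≠ 0 then A_strip2 (PySem.Int.floordiv n 2) else n
termination_by n.natAbs
decreasing_by
  rw [PySem.Int.mod_eq_emod_of_pos (by omega)] at h
  rw [PySem.Int.floordiv_eq_ediv_of_pos (by omega)]
  obtain ⟨h1, h2⟩ := h; omega

-- while n%5 == 0: n //= 5
def A_strip5 (n : Int) : Int :=
  if h : PySem.Int.mod n 5 = 0 ∧ n ≠ 0 then A_strip5 (PySem.Int.floordiv n 5) else n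
termination_by n.natAbs
decreasing_by
  rw [PySem.Int.mod_eq_emod_of_pos (by omega)] at h
  rw [PySem.Int.floordiv_eq_ediv_of_pos (by omega)]
  obtain ⟨h1, h2⟩ := h; omega

-- sumOfDigits: the while-loop `a += n%10; n //= 10` as the obvious recursion
def A_sumDigits (n : Int) : Int :=
  if h : 0 < n then PySem.Int.mod n 10 + A_sumDigits (PySem.Int.floordiv n 10) else 0
termination_by n.toNat
decreasing_by rw [PySem.Int.floordiv_eq_ediv_of_pos (by omega)]; omega

-- heapq ported as a lexicographically sorted list: heappush inserts the tuple in
-- front of the first element that is ≥ it, heappop takes the head = the minimal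
-- tuple, exactly what heapq.heappop returns
def A_hpLe (e h : Int × Int) : Bool := e.1 < h.1 || (e.1 == h.1 && decide (e.2 ≤ h.2))

def A_hpush (qs : List (Int × Int)) (e : Int × Int) : List (Int × Int) :=
  qs.takeWhile (fun h => !(A_hpLe e h)) ++ e :: qs.dropWhile (fun h => !(A_hpLe e h))

structure AState where
  vs : List (Option Int)
  qs : List (Int × Int)
  x : Int

-- one iteration of `for i in range(0, min(x-v, 10))`
def A_body (n q v : Int) (s : AState) (i : Int) : AState :=
  let q3 := PySem.Int.mod (q * 10 + i) n
  let v2 := v + i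
  let v3 := s.vs.getD q3.toNat none
  let doWrite := match v3 with | none => true | some w => decide (v2 < w)
  let s1 := if doWrite then AState.mk (s.vs.set q3.toNat (some v2)) (A_hpush s.qs (v2, q3)) s.x else s
  if q3 = 0 ∧ v2 < s1.x then AState.mk s1.vs s1.qs v2 else s1

-- while len(qs) > 0 — fuel only makes the loop total (bound proved sufficient below)
def A_loop (n : Int) : Nat → AState → Int
  | 0, s => s.x
  | fuel+1, s =>
    match s.qs with
    | [] => s.x
    | (_, q) :: rest =>
      match s.vs.getD q.toNat none with
      | none => s.x  -- unreachable: Python would raise TypeError on x - None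
      | some v =>
        A_loop n fuel ((PySem.List.pyRange 0 (min (s.x - v) 10) 1).foldl (A_body n q v)
          (AState.mk s.vs rest s.x))

-- for i in range(1, min(n, 10)): vs[i] = i; heappush(qs, (i, i))
def A_init (n : Int) : List (Option Int) × List (Int × Int) :=
  (PySem.List.pyRange 1 (min n 10) 1).foldl
    (fun s i => (s.1.set i.toNat (some i), A_hpush s.2 (i, i)))
    (List.replicate n.toNat (none : Option Int), ([] : List (Int × Int)))

def f (n0 : Int) : Int :=
  let n := A_strip5 (A_strip2 n0)
  let init := A_init n
  let x0 := A_sumDigits n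
  -- fuel: an upper bound on the number of loop iterations (proved sufficient below)
  let fuel := init.1.foldl (fun a o => a + (match o with | none => x0 | some v => v).toNat) 0
      + init.2.length + 1
  A_loop n fuel (AState.mk init.1 init.2 x0)

-- ===== PORT B =====

def B_strip2 (n : Int) : Int :=
  if h : PySem.Int.mod n 2 = 0 ∧ n ≠ 0 then B_strip2 (PySem.Int.floordiv n 2) else n
termination_by n.natAbs
decreasing_by
  rw [PySem.Int.mod_eq_emod_of_pos (by omega)] at h
  rw [PySem.Int.floordiv_eq_ediv_of_pos (by omega)]
  obtain ⟨h1, h2⟩ := h; omega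

def B_strip5 (n : Int) : Int :=
  if h : PySem.Int.mod n 5 = 0 ∧ n ≠ 0 then B_strip5 (PySem.Int.floordiv n 5) else n
termination_by n.natAbs
decreasing_by
  rw [PySem.Int.mod_eq_emod_of_pos (by omega)] at h
  rw [PySem.Int.floordiv_eq_ediv_of_pos (by omega)]
  obtain ⟨h1, h2⟩ := h; omega

-- digitSum(n) = 0 if n <= 0 else n % 10 + digitSum(n // 10)
def B_digitSum (n : Int) : Int :=
  if h : n ≤ 0 then 0 else PySem.Int.mod n 10 + B_digitSum (PySem.Int.floordiv n 10)
termination_by n.toNat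
decreasing_by rw [PySem.Int.floordiv_eq_ediv_of_pos (by omega)]; omega

-- 0-1 BFS main loop.  The Python lists `front`/`back` are kept REVERSED here, so
-- that list.pop() / list.append(e) at the Python end become head / cons; the
-- refill `front = back[::-1]; back = []` becomes front := back.reverse.
-- Fuel only makes the loop total (bound proved sufficient below).
def B_loop (n : Int) : Nat → List Int → List Int → List Int → List Int
  | 0, dist, _, _ => dist
  | fuel+1, dist, front, back =>
    match front with
    | [] =>
      match back with
      | [] => dist
      | _ :: _ => B_loop n fuel dist back.reverse []
    | r :: front' =>
      let d := dist.getD r.toNat 0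
      let t1 := PySem.Int.mod (r * 10) n
      let p1 := if d < dist.getD t1.toNat 0 then (dist.set t1.toNat d, t1 :: front')
                else (dist, front')
      let t2 := PySem.Int.mod (r + 1) n
      let p2 := if d + 1 < p1.1.getD t2.toNat 0 then (p1.1.set t2.toNat (d + 1), t2 :: back)
                else (p1.1, back)
      B_loop n fuel p2.1 p1.2 p2.2

def f_alt (n0 : Int) : Int :=
  let n := B_strip5 (B_strip2 n0)
  let cap := B_digitSum n
  -- dist = [cap+1]*n; dist[1 % n] = 1
  let dist := (List.replicate n.toNat (cap + 1)).set (PySem.Int.mod 1 n).toNat 1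
  -- fuel: an upper bound on the number of loop iterations (proved sufficient below)
  let fuel := 3 * dist.foldl (fun a v => a + v.toNat) 0 + 3
  (B_loop n fuel dist [PySem.Int.mod 1 n] []).getD 0 0

-- ===== PRECONDITION & SPEC =====

-- Pre_f excludes n ≤ 0: the task (minimum digit sum of a positive multiple of n)
-- concerns positive n only; A diverges at n = 0, and on negative n A returns the
-- vacuous 0 (sumOfDigits of a negative number is 0) where B raises IndexError.
def Pre_f (n : Int) : Prop := 1 ≤ n
instance (n : Int) : Decidable (Pre_f n) := by unfold Pre_f; infer_instance

def pvWitness_f : Int := 12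

def Spec_f (n : Int) (out : Int) : Prop := out = f_alt n
instance (n : Int) (out : Int) : Decidable (Spec_f n out) := by unfold Spec_f; infer_instance

-- ===== CLAIM (what is proved, stated in full; the proofs are below) =====
def Claim_equal_f : Prop := ∀ (n : Int), Dom_f n → Pre_f n → Spec_f n (f n)

-- ===== LEMMAS AND PROOFS =====

-- digit-sum facts ------------------------------------------------------------

theorem ds_unfold (n : Int) (h : 0 < n) :
    A_sumDigits n = n % 10 + A_sumDigits (n / 10) := by
  rw [A_sumDigits, dif_pos h, PySem.Int.mod_eq_emod_of_pos (by omega),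
    PySem.Int.floordiv_eq_ediv_of_pos (by omega)]

theorem ds_zero (n : Int) (h : ¬ 0 < n) : A_sumDigits n = 0 := by
  rw [A_sumDigits, dif_neg h]

theorem ds_nonneg (n : Int) : 0 ≤ A_sumDigits n := by
  induction n using A_sumDigits.induct with
  | case1 n h ih =>
    rw [ds_unfold n h]
    have := Int.emod_nonneg n (by omega : (10:Int) ≠ 0)
    rw [PySem.Int.floordiv_eq_ediv_of_pos (by omega)] at ih
    omega
  | case2 n h => rw [ds_zero n h]

theorem ds_small (n : Int) (h0 : 0 ≤ n) (h1 : n < 10) : A_sumDigits n = n := by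
  rcases eq_or_lt_of_le h0 with h | h
  · rw [ds_zero n (by omega)]; omega
  · rw [ds_unfold n h]
    have e1 : n % 10 = n := by omega
    have e2 : n / 10 = 0 := by omega
    rw [e1, e2, ds_zero 0 (by omega)]; omega

theorem ds_step (N i : Int) (hN : 0 ≤ N) (h0 : 0 ≤ i) (h1 : i < 10) :
    A_sumDigits (10 * N + i) = A_sumDigits N + i := by
  by_cases h : 0 < 10 * N + i
  · rw [ds_unfold _ h]
    have e1 : (10 * N + i) % 10 = i := by omega
    have e2 : (10 * N + i) / 10 = N := by omega
    rw [e1, e2]; omega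
  · have hN0 : N = 0 ∧ i = 0 := by omega
    rw [hN0.1, hN0.2]; simp

theorem ds_le_self (n : Int) (h : 0 ≤ n) : A_sumDigits n ≤ n := by
  induction n using A_sumDigits.induct with
  | case1 n hp ih =>
    rw [ds_unfold n hp]
    rw [PySem.Int.floordiv_eq_ediv_of_pos (by omega)] at ih
    have := ih (by omega)
    omega
  | case2 n hp => rw [ds_zero n hp]; omega

theorem ds_pos (n : Int) (h : 1 ≤ n) : 1 ≤ A_sumDigits n := by
  induction n using A_sumDigits.induct with
  | case1 n hp ih =>
    rw [ds_unfold n hp]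
    rw [PySem.Int.floordiv_eq_ediv_of_pos (by omega)] at ih
    by_cases hr : 1 ≤ n % 10
    · have := ds_nonneg (n / 10); omega
    · have h10 : 1 ≤ n / 10 := by omega
      have := ih h10; omega
  | case2 n hp => omega

theorem ds_succ_le (n : Int) (h : 0 ≤ n) : A_sumDigits (n + 1) ≤ A_sumDigits n + 1 := by
  induction hk : n.toNat using Nat.strong_induction_on generalizing n with
  | _ k IH =>
    by_cases h9 : n % 10 = 9
    · have hn9 : 9 ≤ n := by omega
      rw [ds_unfold (n + 1) (by omega)]
      have e1 : (n + 1) % 10 = 0 := by omega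
      have e2 : (n + 1) / 10 = n / 10 + 1 := by omega
      rw [e1, e2]
      have hrec := IH (n / 10).toNat (by omega) (n / 10) (by omega) rfl
      rw [ds_unfold n (by omega), h9]
      omega
    · rw [ds_unfold (n + 1) (by omega)]
      have e1 : (n + 1) % 10 = n % 10 + 1 := by omega
      have e2 : (n + 1) / 10 = n / 10 := by omega
      rw [e1, e2]
      by_cases h0 : 0 < n
      · rw [ds_unfold n h0]; omega
      · have hz : n = 0 := by omega
        subst hz
        norm_num
        rw [ds_zero 0 (by omega)]
        omega

theorem ds_eq_B (n : Int) : B_digitSum n = A_sumDigits n := by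
  induction n using B_digitSum.induct with
  | case1 n h => rw [B_digitSum, dif_pos h, ds_zero n (by omega)]
  | case2 n h ih =>
    rw [B_digitSum, dif_neg h, ih, ds_unfold n (by omega),
      PySem.Int.mod_eq_emod_of_pos (by omega), PySem.Int.floordiv_eq_ediv_of_pos (by omega)]

-- stripping facts ------------------------------------------------------------

theorem strip2_eq (n : Int) : B_strip2 n = A_strip2 n := by
  induction n using B_strip2.induct with
  | case1 n h ih =>
    rw [B_strip2, dif_pos h, ih]
    conv_rhs => rw [A_strip2]
    rw [dif_pos h]
  | case2 n h => rw [B_strip2, dif_neg h, A_strip2, dif_neg h]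

theorem strip5_eq (n : Int) : B_strip5 n = A_strip5 n := by
  induction n using B_strip5.induct with
  | case1 n h ih =>
    rw [B_strip5, dif_pos h, ih]
    conv_rhs => rw [A_strip5]
    rw [dif_pos h]
  | case2 n h => rw [B_strip5, dif_neg h, A_strip5, dif_neg h]

theorem strip2_pos (n : Int) (h : 1 ≤ n) : 1 ≤ A_strip2 n := by
  induction n using A_strip2.induct with
  | case1 n hc ih =>
    rw [A_strip2, dif_pos hc]
    rw [PySem.Int.mod_eq_emod_of_pos (by omega)] at hc
    apply ih
    rw [PySem.Int.floordiv_eq_ediv_of_pos (by omega)]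
    omega
  | case2 n hc => rw [A_strip2, dif_neg hc]; exact h

theorem strip5_pos (n : Int) (h : 1 ≤ n) : 1 ≤ A_strip5 n := by
  induction n using A_strip5.induct with
  | case1 n hc ih =>
    rw [A_strip5, dif_pos hc]
    rw [PySem.Int.mod_eq_emod_of_pos (by omega)] at hc
    apply ih
    rw [PySem.Int.floordiv_eq_ediv_of_pos (by omega)]
    omega
  | case2 n hc => rw [A_strip5, dif_neg hc]; exact h

-- mod arithmetic helpers -----------------------------------------------------

theorem emod_ten_shift (a b m : Int) : (10 * (a % m) + b) % m = (10 * a + b) % m := by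
  conv_rhs => rw [show 10 * a + b = (10 * (a % m) + b) + (10 * (a / m)) * m by
    rw [Int.emod_def]; ring]
  rw [Int.add_mul_emod_self_right]

theorem emod_ten_shift_zero (a m : Int) : (10 * (a % m)) % m = (10 * a) % m := by
  have := emod_ten_shift a 0 m
  simpa using this

theorem emod_succ_shift (a m : Int) : (a % m + 1) % m = (a + 1) % m := by
  conv_rhs => rw [show a + 1 = (a % m + 1) + (a / m) * m by rw [Int.emod_def]; ring]
  rw [Int.add_mul_emod_self_right]

-- list access helpers ---------------------------------------------------------

def vget (vs : List (Option Int)) (j : Nat) : Option Int := vs.getD j none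

theorem vget_set_eq (vs : List (Option Int)) (k : Nat) (a : Option Int) (h : k < vs.length) :
    vget (vs.set k a) k = a := by
  simp [vget, List.getD, h]

theorem vget_set_ne (vs : List (Option Int)) (k j : Nat) (a : Option Int) (h : j ≠ k) :
    vget (vs.set k a) j = vget vs j := by
  unfold vget List.getD
  rw [List.getElem?_set_ne (Ne.symm h)]

theorem vget_none_of_ge (vs : List (Option Int)) (j : Nat) (h : vs.length ≤ j) :
    vget vs j = none := by
  simp [vget, List.getD, List.getElem?_eq_none h]

def dget (l : List Int) (j : Nat) : Int := l.getD j 0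

theorem dget_set_eq (l : List Int) (k : Nat) (a : Int) (h : k < l.length) :
    dget (l.set k a) k = a := by
  simp [dget, List.getD, h]

theorem dget_set_ne (l : List Int) (k j : Nat) (a : Int) (h : j ≠ k) :
    dget (l.set k a) j = dget l j := by
  unfold dget List.getD
  rw [List.getElem?_set_ne (Ne.symm h)]

theorem sum_set_nat (l : List Nat) (k : Nat) (b : Nat) (h : k < l.length) :
    (l.set k b).sum + l[k] = l.sum + b := by
  induction l generalizing k with
  | nil => simp at h
  | cons x xs ih =>
    cases k with
    | zero => simp [List.set]; omega
    | succ k =>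
      simp only [List.set, List.sum_cons, List.getElem_cons_succ]
      have := ih k (by simpa using h); omega

theorem dget_eq_getElem (l : List Int) (k : Nat) (h : k < l.length) : dget l k = l[k] := by
  simp [dget, List.getD, List.getElem?_eq_getElem h]

theorem vget_eq_getElem (vs : List (Option Int)) (k : Nat) (h : k < vs.length) :
    vget vs k = vs[k] := by
  simp [vget, List.getD, List.getElem?_eq_getElem h]

theorem sum_toNat_set (l : List Int) (k : Nat) (c : Int) (h : k < l.length) (h0 : 0 ≤ c)
    (h1 : c < dget l k) :
    3 * ((l.set k c).map Int.toNat).sum + 3 ≤ 3 * (l.map Int.toNat).sum := by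
  have hmap : (l.set k c).map Int.toNat = (l.map Int.toNat).set k c.toNat := List.map_set ..
  have hs := sum_set_nat (l.map Int.toNat) k c.toNat (by simpa using h)
  rw [dget_eq_getElem l k h] at h1
  have hg : (l.map Int.toNat)[k]'(by simpa using h) = (l[k]).toNat := List.getElem_map ..
  rw [hmap]
  omega

theorem dget_replicate (k : Nat) (c : Int) (j : Nat) (h : j < k) :
    dget (List.replicate k c) j = c := by
  simp [dget, List.getD, h]

-- achievability --------------------------------------------------------------

def Wit (m : Int) (j v : Int) : Prop :=
  0 ≤ v ∧ ∃ N : Int, 1 ≤ N ∧ N % m = j ∧ A_sumDigits N = v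

def AchievesA (m c : Int) : Prop := ∃ N : Int, 1 ≤ N ∧ N % m = 0 ∧ A_sumDigits N = c

-- ===== A-side invariants =====

def relaxedA (m x : Int) (vs : List (Option Int)) (j v : Int) : Prop :=
  ∀ i : Int, 0 ≤ i → i < 10 →
    x ≤ v + i ∨ ∃ w, vget vs ((10 * j + i) % m).toNat = some w ∧ w ≤ v + i

def AInv (m : Int) (s : AState) : Prop :=
  s.vs.length = m.toNat ∧
  (∀ (j : Nat) v, vget s.vs j = some v → Wit m (j : Int) v) ∧
  (0 ≤ s.x ∧ s.x ≤ A_sumDigits m ∧ AchievesA m s.x) ∧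
  (∀ p q, (p, q) ∈ s.qs → 0 ≤ q ∧ q < m ∧ ∃ v, vget s.vs q.toNat = some v) ∧
  (∀ (j : Nat) v, vget s.vs j = some v →
    (∃ p, (p, (j : Int)) ∈ s.qs) ∨ relaxedA m s.x s.vs (j : Int) v) ∧
  (∀ d : Int, 1 ≤ d → d < min m 10 → ∃ v, vget s.vs d.toNat = some v ∧ v ≤ d) ∧
  (∀ v, vget s.vs 0 = some v → s.x ≤ v)

-- the same, mid-inner-loop: residue q may be neither queued nor yet relaxed
def AW (m q v : Int) (s : AState) : Prop :=
  s.vs.length = m.toNat ∧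
  (∀ (j : Nat) w, vget s.vs j = some w → Wit m (j : Int) w) ∧
  (0 ≤ s.x ∧ s.x ≤ A_sumDigits m ∧ AchievesA m s.x) ∧
  (∀ p q', (p, q') ∈ s.qs → 0 ≤ q' ∧ q' < m ∧ ∃ w, vget s.vs q'.toNat = some w) ∧
  (∀ (j : Nat) w, vget s.vs j = some w →
    (∃ p, (p, (j : Int)) ∈ s.qs) ∨ ((j : Int) = q ∧ w = v) ∨ relaxedA m s.x s.vs (j : Int) w) ∧
  (∀ d : Int, 1 ≤ d → d < min m 10 → ∃ w, vget s.vs d.toNat = some w ∧ w ≤ d) ∧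
  (∀ w, vget s.vs 0 = some w → s.x ≤ w)

def monoA (vs vs' : List (Option Int)) : Prop :=
  ∀ (j : Nat) w, vget vs j = some w → ∃ w', w' ≤ w ∧ vget vs' j = some w'

def wOpt (X0 : Int) (o : Option Int) : Nat := (match o with | none => X0 | some v => v).toNat

def Ameas (X0 : Int) (s : AState) : Nat := (s.vs.map (wOpt X0)).sum + s.qs.length

theorem mem_A_hpush (qs : List (Int × Int)) (e a : Int × Int) (h : a ∈ qs) :
    a ∈ A_hpush qs e := by
  unfold A_hpush
  rw [← List.takeWhile_append_dropWhile (p := fun h => !(A_hpLe e h)) (l := qs)] at h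
  rcases List.mem_append.1 h with h1 | h1
  · exact List.mem_append.2 (Or.inl h1)
  · exact List.mem_append.2 (Or.inr (List.mem_cons.2 (Or.inr h1)))

theorem mem_A_hpush_self (qs : List (Int × Int)) (e : Int × Int) : e ∈ A_hpush qs e := by
  unfold A_hpush
  exact List.mem_append.2 (Or.inr (List.mem_cons_self ..))

theorem mem_of_mem_A_hpush (qs : List (Int × Int)) (e a : Int × Int) (h : a ∈ A_hpush qs e) :
    a = e ∨ a ∈ qs := by
  unfold A_hpush at h
  rcases List.mem_append.1 h with h1 | h1
  · exact Or.inr ((List.takeWhile_sublist _).subset h1)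
  · rcases List.mem_cons.1 h1 with h2 | h2
    · exact Or.inl h2
    · exact Or.inr ((List.dropWhile_sublist _).subset h2)

theorem length_A_hpush (qs : List (Int × Int)) (e : Int × Int) :
    (A_hpush qs e).length = qs.length + 1 := by
  unfold A_hpush
  have := congrArg List.length
    (List.takeWhile_append_dropWhile (p := fun h => !(A_hpLe e h)) (l := qs))
  rw [List.length_append] at this ⊢
  simp only [List.length_cons]
  omega

theorem relaxed_mono (m x x' : Int) (vs vs' : List (Option Int)) (j w : Int)
    (hmono : monoA vs vs') (hx : x' ≤ x) (h : relaxedA m x vs j w) :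
    relaxedA m x' vs' j w := by
  intro i h0 h1
  rcases h i h0 h1 with h | ⟨w2, hw2, hle⟩
  · exact Or.inl (by omega)
  · obtain ⟨w2', hle', hg⟩ := hmono _ _ hw2
    exact Or.inr ⟨w2', hg, by omega⟩

theorem monoA_refl (vs : List (Option Int)) : monoA vs vs := fun _ w h => ⟨w, le_refl w, h⟩

theorem monoA_set (vs : List (Option Int)) (k : Nat) (c : Int)
    (h : vget vs k = none ∨ ∃ w, vget vs k = some w ∧ c < w) :
    monoA vs (vs.set k (some c)) := by
  intro j w hj
  by_cases hjk : j = k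
  · subst hjk
    have hklen : j < vs.length := by
      by_contra hc
      rw [vget_none_of_ge vs j (by omega)] at hj
      simp at hj
    rcases h with h | ⟨w', hw', hlt⟩
    · rw [hj] at h; simp at h
    · rw [hj] at hw'
      have hww : w = w' := by injection hw'
      exact ⟨c, by omega, vget_set_eq vs j _ hklen⟩
  · exact ⟨w, le_refl w, by rw [vget_set_ne _ _ _ _ hjk]; exact hj⟩

theorem wsum_set (X0 : Int) (vs : List (Option Int)) (k : Nat) (c : Int) (hk : k < vs.length)
    (h : c.toNat < wOpt X0 (vget vs k)) :
    ((vs.set k (some c)).map (wOpt X0)).sum + 1 ≤ (vs.map (wOpt X0)).sum := by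
  have hmap : (vs.set k (some c)).map (wOpt X0) = (vs.map (wOpt X0)).set k (wOpt X0 (some c)) :=
    List.map_set ..
  have hs := sum_set_nat (vs.map (wOpt X0)) k (wOpt X0 (some c)) (by simpa using hk)
  have hg : (vs.map (wOpt X0))[k]'(by simpa using hk) = wOpt X0 (vs[k]) := List.getElem_map ..
  have hv : vget vs k = vs[k] := vget_eq_getElem vs k hk
  rw [hmap]
  rw [hv] at h
  have hc : wOpt X0 (some c) = c.toNat := rfl
  omega

theorem A_body_step (m q v i x0 : Int) (hm : 1 ≤ m) (hq0 : 0 ≤ q) (hq1 : q < m)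
    (hv : Wit m q v) (hi0 : 0 ≤ i) (hi1 : i < 10) (hi2 : v + i < x0)
    (hx0 : x0 ≤ A_sumDigits m) (s : AState) (hW : AW m q v s) (hx : s.x ≤ x0) :
    AW m q v (A_body m q v s i) ∧ monoA s.vs (A_body m q v s i).vs ∧
    (∀ e ∈ s.qs, e ∈ (A_body m q v s i).qs) ∧ (A_body m q v s i).x ≤ s.x ∧
    Ameas (A_sumDigits m) (A_body m q v s i) ≤ Ameas (A_sumDigits m) s ∧
    (∃ w, vget (A_body m q v s i).vs ((q * 10 + i) % m).toNat = some w ∧ w ≤ v + i) ∧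
    (vget (A_body m q v s i).vs q.toNat = vget s.vs q.toNat ∨
      ∃ p, (p, q) ∈ (A_body m q v s i).qs) := by
  obtain ⟨hL, hS, hX, hQ, hR, hB5, hZ⟩ := hW
  have hm' : (0:Int) < m := by omega
  have hq3 : PySem.Int.mod (q * 10 + i) m = (q * 10 + i) % m :=
    PySem.Int.mod_eq_emod_of_pos hm'
  have h30 : 0 ≤ (q * 10 + i) % m := Int.emod_nonneg _ (by omega)
  have h31 : (q * 10 + i) % m < m := Int.emod_lt_of_pos _ hm'
  have h3len : ((q * 10 + i) % m).toNat < s.vs.length := by omega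
  have h3c : ((((q * 10 + i) % m).toNat : Int)) = (q * 10 + i) % m := Int.toNat_of_nonneg h30
  obtain ⟨hv0, N, hN1, hN2, hN3⟩ := hv
  have hwitN' : 1 ≤ 10 * N + i ∧ (10 * N + i) % m = (q * 10 + i) % m ∧
      A_sumDigits (10 * N + i) = v + i := by
    refine ⟨by omega, ?_, ?_⟩
    · calc (10 * N + i) % m = (10 * (N % m) + i) % m := (emod_ten_shift N i m).symm
        _ = (q * 10 + i) % m := by rw [hN2]; ring_nf
    · rw [ds_step N i (by omega) hi0 hi1, hN3]
  -- shared facts for the two writing branches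
  have hAW : monoA s.vs (s.vs.set ((q * 10 + i) % m).toNat (some (v + i))) → ∀ xf : Int,
      0 ≤ xf → xf ≤ s.x →
      ((xf = s.x ∧ ¬((q * 10 + i) % m = 0 ∧ v + i < s.x)) ∨
        (xf = v + i ∧ (q * 10 + i) % m = 0 ∧ v + i < s.x)) →
      AW m q v (AState.mk (s.vs.set ((q * 10 + i) % m).toNat (some (v + i)))
        (A_hpush s.qs (v + i, (q * 10 + i) % m)) xf) := by
    intro hmono xf hxf0 hxfle hxfc
    unfold AW
    dsimp only
    refine ⟨by simpa using hL, ?_, ?_, ?_, ?_, ?_, ?_⟩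
    · intro j w hj
      by_cases hjk : j = ((q * 10 + i) % m).toNat
      · subst hjk
        rw [vget_set_eq _ _ _ h3len] at hj
        have hww : v + i = w := by injection hj
        subst hww
        exact ⟨by omega, 10 * N + i, hwitN'.1, by rw [h3c]; exact hwitN'.2.1, hwitN'.2.2⟩
      · rw [vget_set_ne _ _ _ _ hjk] at hj
        exact hS j w hj
    · refine ⟨by omega, by omega, ?_⟩
      rcases hxfc with ⟨h, _⟩ | ⟨h, h0, _⟩
      · rw [h]; exact hX.2.2
      · rw [h]
        exact ⟨10 * N + i, hwitN'.1, by rw [hwitN'.2.1, h0], hwitN'.2.2⟩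
    · intro p q' hpq
      rcases mem_of_mem_A_hpush _ _ _ hpq with h | h
      · have h1 : q' = (q * 10 + i) % m := by
          have := congrArg Prod.snd h; simpa using this
        subst h1
        exact ⟨h30, h31, v + i, vget_set_eq _ _ _ h3len⟩
      · obtain ⟨h1, h2, w', hw'⟩ := hQ p q' h
        refine ⟨h1, h2, ?_⟩
        by_cases hjk : q'.toNat = ((q * 10 + i) % m).toNat
        · exact ⟨v + i, by rw [hjk]; exact vget_set_eq _ _ _ h3len⟩
        · exact ⟨w', by rw [vget_set_ne _ _ _ _ hjk]; exact hw'⟩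
    · intro j w hj
      by_cases hjk : j = ((q * 10 + i) % m).toNat
      · subst hjk
        refine Or.inl ⟨v + i, ?_⟩
        rw [h3c]
        exact mem_A_hpush_self ..
      · rw [vget_set_ne _ _ _ _ hjk] at hj
        rcases hR j w hj with ⟨p, hp⟩ | h | h
        · exact Or.inl ⟨p, mem_A_hpush _ _ _ hp⟩
        · exact Or.inr (Or.inl h)
        · exact Or.inr (Or.inr (relaxed_mono m s.x xf s.vs _ j w hmono hxfle h))
    · intro d hd1 hd2
      obtain ⟨w, hw1, hw2⟩ := hB5 d hd1 hd2
      obtain ⟨w', hle', hg⟩ := hmono _ _ hw1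
      exact ⟨w', hg, by omega⟩
    · intro w hw
      by_cases h0 : ((q * 10 + i) % m).toNat = 0
      · rw [← h0, vget_set_eq _ _ _ h3len] at hw
        have hww : v + i = w := by injection hw
        subst hww
        rcases hxfc with ⟨h, hnot⟩ | ⟨h, _, _⟩
        · have h3z : (q * 10 + i) % m = 0 := by omega
          rw [h]
          by_contra hc
          exact hnot ⟨h3z, by omega⟩
        · omega
      · rw [vget_set_ne s.vs _ 0 _ (fun hh => h0 hh.symm)] at hw
        exact le_trans hxfle (hZ w hw)
  have hCq : ∀ qs' : List (Int × Int), (v + i, (q * 10 + i) % m) ∈ qs' →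
      (vget (s.vs.set ((q * 10 + i) % m).toNat (some (v + i))) q.toNat = vget s.vs q.toNat ∨
        ∃ p, (p, q) ∈ qs') := by
    intro qs' hmem
    by_cases hjk : q.toNat = ((q * 10 + i) % m).toNat
    · have hqe : (q * 10 + i) % m = q := by omega
      exact Or.inr ⟨v + i, by rw [hqe] at hmem; exact hmem⟩
    · exact Or.inl (vget_set_ne _ _ _ _ hjk)
  cases hv3 : s.vs.getD ((q * 10 + i) % m).toNat none with
  | none =>
    have hv3' : vget s.vs ((q * 10 + i) % m).toNat = none := hv3
    have hmono : monoA s.vs (s.vs.set ((q * 10 + i) % m).toNat (some (v + i))) :=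
      monoA_set s.vs _ (v + i) (Or.inl hv3')
    have hmeas : ∀ xf : Int, Ameas (A_sumDigits m)
        (AState.mk (s.vs.set ((q * 10 + i) % m).toNat (some (v + i)))
          (A_hpush s.qs (v + i, (q * 10 + i) % m)) xf) ≤ Ameas (A_sumDigits m) s := by
      intro xf
      unfold Ameas
      dsimp only
      have := wsum_set (A_sumDigits m) s.vs _ (v + i) h3len
        (by rw [hv3']; show (v + i).toNat < (A_sumDigits m).toNat; omega)
      rw [length_A_hpush]
      omega
    by_cases hx2 : (q * 10 + i) % m = 0 ∧ v + i < s.x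
    · have hbody : A_body m q v s i =
          AState.mk (s.vs.set ((q * 10 + i) % m).toNat (some (v + i)))
            (A_hpush s.qs (v + i, (q * 10 + i) % m)) (v + i) := by
        simp only [A_body, hq3, hv3, ite_true]
        rw [if_pos hx2]
      rw [hbody]
      refine ⟨hAW hmono (v + i) (by omega) (by omega) (Or.inr ⟨rfl, hx2⟩), hmono,
        fun e he => mem_A_hpush _ _ _ he, show v + i ≤ s.x by omega, hmeas _,
        ⟨v + i, vget_set_eq _ _ _ h3len, le_refl _⟩, hCq _ (mem_A_hpush_self ..)⟩
    · have hbody : A_body m q v s i =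
          AState.mk (s.vs.set ((q * 10 + i) % m).toNat (some (v + i)))
            (A_hpush s.qs (v + i, (q * 10 + i) % m)) s.x := by
        simp only [A_body, hq3, hv3, ite_true]
        rw [if_neg hx2]
      rw [hbody]
      refine ⟨hAW hmono s.x hX.1 (le_refl _) (Or.inl ⟨rfl, hx2⟩), hmono,
        fun e he => mem_A_hpush _ _ _ he, le_refl _, hmeas _,
        ⟨v + i, vget_set_eq _ _ _ h3len, le_refl _⟩, hCq _ (mem_A_hpush_self ..)⟩
  | some w =>
    have hv3' : vget s.vs ((q * 10 + i) % m).toNat = some w := hv3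
    by_cases hlt : v + i < w
    · have hmono : monoA s.vs (s.vs.set ((q * 10 + i) % m).toNat (some (v + i))) :=
        monoA_set s.vs _ (v + i) (Or.inr ⟨w, hv3', hlt⟩)
      have hw0 : 0 ≤ w := (hS _ _ hv3').1
      have hmeas : ∀ xf : Int, Ameas (A_sumDigits m)
          (AState.mk (s.vs.set ((q * 10 + i) % m).toNat (some (v + i)))
            (A_hpush s.qs (v + i, (q * 10 + i) % m)) xf) ≤ Ameas (A_sumDigits m) s := by
        intro xf
        unfold Ameas
        dsimp only
        have := wsum_set (A_sumDigits m) s.vs _ (v + i) h3len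
          (by rw [hv3']; show (v + i).toNat < w.toNat; omega)
        rw [length_A_hpush]
        omega
      by_cases hx2 : (q * 10 + i) % m = 0 ∧ v + i < s.x
      · have hbody : A_body m q v s i =
            AState.mk (s.vs.set ((q * 10 + i) % m).toNat (some (v + i)))
              (A_hpush s.qs (v + i, (q * 10 + i) % m)) (v + i) := by
          simp only [A_body, hq3, hv3, decide_eq_true_eq, if_pos hlt]
          rw [if_pos hx2]
        rw [hbody]
        refine ⟨hAW hmono (v + i) (by omega) (by omega) (Or.inr ⟨rfl, hx2⟩), hmono,
          fun e he => mem_A_hpush _ _ _ he, show v + i ≤ s.x by omega, hmeas _,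
          ⟨v + i, vget_set_eq _ _ _ h3len, le_refl _⟩, hCq _ (mem_A_hpush_self ..)⟩
      · have hbody : A_body m q v s i =
            AState.mk (s.vs.set ((q * 10 + i) % m).toNat (some (v + i)))
              (A_hpush s.qs (v + i, (q * 10 + i) % m)) s.x := by
          simp only [A_body, hq3, hv3, decide_eq_true_eq, if_pos hlt]
          rw [if_neg hx2]
        rw [hbody]
        refine ⟨hAW hmono s.x hX.1 (le_refl _) (Or.inl ⟨rfl, hx2⟩), hmono,
          fun e he => mem_A_hpush _ _ _ he, le_refl _, hmeas _,
          ⟨v + i, vget_set_eq _ _ _ h3len, le_refl _⟩, hCq _ (mem_A_hpush_self ..)⟩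
    · by_cases hx2 : (q * 10 + i) % m = 0 ∧ v + i < s.x
      · -- impossible: the 0-cell already holds w ≤ v+i < s.x, contradicting s.x ≤ w
        exfalso
        have h0 : ((q * 10 + i) % m).toNat = 0 := by omega
        have := hZ w (by rw [← h0]; exact hv3')
        omega
      · have hbody : A_body m q v s i = s := by
          simp only [A_body, hq3, hv3, decide_eq_true_eq, if_neg hlt]
          rw [if_neg hx2]
        rw [hbody]
        exact ⟨⟨hL, hS, hX, hQ, hR, hB5, hZ⟩, monoA_refl s.vs, fun e he => he, le_refl _,
          le_refl _, ⟨w, hv3', by omega⟩, Or.inl rfl⟩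

theorem monoA_trans (a b c : List (Option Int)) (h1 : monoA a b) (h2 : monoA b c) :
    monoA a c := by
  intro j w hw
  obtain ⟨w1, hle1, hg1⟩ := h1 j w hw
  obtain ⟨w2, hle2, hg2⟩ := h2 j w1 hg1
  exact ⟨w2, le_trans hle2 hle1, hg2⟩

theorem A_fold (m q v x0 : Int) (hm : 1 ≤ m) (hq0 : 0 ≤ q) (hq1 : q < m)
    (hv : Wit m q v) (hx0 : x0 ≤ A_sumDigits m) :
    ∀ (L : List Int) (s : AState), (∀ i ∈ L, 0 ≤ i ∧ i < 10 ∧ v + i < x0) →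
    AW m q v s → s.x ≤ x0 →
    AW m q v (L.foldl (A_body m q v) s) ∧ monoA s.vs (L.foldl (A_body m q v) s).vs ∧
    (∀ e ∈ s.qs, e ∈ (L.foldl (A_body m q v) s).qs) ∧
    (L.foldl (A_body m q v) s).x ≤ s.x ∧
    Ameas (A_sumDigits m) (L.foldl (A_body m q v) s) ≤ Ameas (A_sumDigits m) s ∧
    (∀ i ∈ L, ∃ w, vget (L.foldl (A_body m q v) s).vs ((q * 10 + i) % m).toNat = some w ∧
      w ≤ v + i) ∧
    (vget (L.foldl (A_body m q v) s).vs q.toNat = vget s.vs q.toNat ∨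
      ∃ p, (p, q) ∈ (L.foldl (A_body m q v) s).qs) := by
  intro L
  induction L with
  | nil =>
    intro s _ hW hx
    exact ⟨hW, monoA_refl s.vs, fun e he => he, le_refl _, le_refl _, by simp, Or.inl rfl⟩
  | cons a L ih =>
    intro s hmem hW hx
    obtain ⟨ha0, ha1, ha2⟩ := hmem a (List.mem_cons_self ..)
    obtain ⟨hW1, hmono1, hqs1, hx1, hm1, htar1, hC1⟩ :=
      A_body_step m q v a x0 hm hq0 hq1 hv ha0 ha1 ha2 hx0 s hW hx
    obtain ⟨hW2, hmono2, hqs2, hx2, hm2, htar2, hC2⟩ :=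
      ih (A_body m q v s a) (fun i hi => hmem i (List.mem_cons.2 (Or.inr hi))) hW1
        (le_trans hx1 hx)
    simp only [List.foldl_cons]
    refine ⟨hW2, monoA_trans _ _ _ hmono1 hmono2, fun e he => hqs2 _ (hqs1 _ he),
      le_trans hx2 hx1, le_trans hm2 hm1, ?_, ?_⟩
    · intro i hi
      rcases List.mem_cons.1 hi with rfl | hi'
      · obtain ⟨w, hw1, hw2⟩ := htar1
        obtain ⟨w', hle', hg⟩ := hmono2 _ _ hw1
        exact ⟨w', hg, by omega⟩
      · exact htar2 i hi'
    · rcases hC2 with h2 | h2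
      · rcases hC1 with h1 | h1
        · exact Or.inl (by rw [h2, h1])
        · obtain ⟨p, hp⟩ := h1
          exact Or.inr ⟨p, hqs2 _ hp⟩
      · exact Or.inr h2

theorem A_complete (m : Int) (hm : 1 ≤ m) (s : AState) (hInv : AInv m s) (hqs : s.qs = []) :
    ∀ N : Int, 1 ≤ N →
      s.x ≤ A_sumDigits N ∨ ∃ w, vget s.vs (N % m).toNat = some w ∧ w ≤ A_sumDigits N := by
  obtain ⟨hL, hS, hX, hQ, hR, hB5, hZ⟩ := hInv
  intro N hN
  induction hg : N.toNat using Nat.strong_induction_on generalizing N with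
  | _ k IH =>
    by_cases h10 : N < 10
    · by_cases hNm : N < m
      · obtain ⟨w, hw1, hw2⟩ := hB5 N hN (by omega)
        right
        refine ⟨w, ?_, ?_⟩
        · rw [Int.emod_eq_of_lt (by omega) hNm]
          exact hw1
        · rw [ds_small N (by omega) h10]; omega
      · left
        have h1 := hX.2.1
        have h2 := ds_le_self m (by omega)
        rw [ds_small N (by omega) h10]
        omega
    · have hN10 : 1 ≤ N / 10 := by omega
      have hds : A_sumDigits N = A_sumDigits (N / 10) + N % 10 := by
        have := ds_step (N / 10) (N % 10) (by omega) (by omega) (by omega)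
        rw [show 10 * (N / 10) + N % 10 = N by omega] at this
        omega
      rcases IH (N / 10).toNat (by omega) (N / 10) hN10 rfl with h | ⟨w, hw1, hw2⟩
      · left; omega
      · rcases hR _ _ hw1 with ⟨p, hp⟩ | hrel
        · rw [hqs] at hp; simp at hp
        · have hcast : ((((N / 10) % m).toNat : Int)) = (N / 10) % m := by
            have := Int.emod_nonneg (N / 10) (by omega : m ≠ 0)
            omega
          have hi := hrel (N % 10) (by omega) (by omega)
          have hres : (10 * (((N / 10) % m : Int)) + N % 10) % m = N % m := by
            rw [emod_ten_shift]
            congr 1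
            omega
          rw [hcast, hres] at hi
          rcases hi with h | ⟨w2, hw21, hw22⟩
          · left; omega
          · right
            exact ⟨w2, hw21, by omega⟩

theorem A_run (m : Int) (hm : 1 ≤ m) :
    ∀ (fuel : Nat) (s : AState), AInv m s → Ameas (A_sumDigits m) s < fuel →
      AchievesA m (A_loop m fuel s) ∧
      ∀ N : Int, 1 ≤ N → N % m = 0 → A_loop m fuel s ≤ A_sumDigits N := by
  intro fuel
  induction fuel with
  | zero => intro s _ hlt; omega
  | succ fuel IH =>
    intro s hInv hlt
    obtain ⟨vs, qs, x⟩ := s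
    cases hqs : qs with
    | nil =>
      subst hqs
      have hgoal : A_loop m (fuel + 1) (AState.mk vs [] x) = x := rfl
      rw [hgoal]
      obtain ⟨hL, hS, hX, hQ, hR, hB5, hZ⟩ := hInv
      dsimp only at hL hS hX hQ hR hB5 hZ
      refine ⟨hX.2.2, ?_⟩
      intro N hN1 hN2
      rcases A_complete m hm (AState.mk vs [] x) ⟨hL, hS, hX, hQ, hR, hB5, hZ⟩ rfl N hN1
        with h | ⟨w, hw1, hw2⟩
      · exact h
      · rw [hN2] at hw1
        have := hZ w hw1
        omega
    | cons e rest =>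
      subst hqs
      obtain ⟨p, q⟩ := e
      obtain ⟨hL, hS, hX, hQ, hR, hB5, hZ⟩ := hInv
      dsimp only at hL hS hX hQ hR hB5 hZ
      obtain ⟨hq0, hq1, v, hv⟩ := hQ p q (List.mem_cons_self ..)
      have hv' : vs.getD q.toNat none = some v := hv
      have hqc : ((q.toNat : Int)) = q := Int.toNat_of_nonneg hq0
      have hWit : Wit m q v := by
        have := hS q.toNat v hv
        rwa [hqc] at this
      -- the weakened invariant after popping (p, q)
      have hAW0 : AW m q v (AState.mk vs rest x) := by
        refine ⟨hL, hS, hX, fun p' q' hp' => hQ p' q' (List.mem_cons.2 (Or.inr hp')),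
          ?_, hB5, hZ⟩
        intro j w hj
        rcases hR j w hj with ⟨p', hp'⟩ | hrel
        · rcases List.mem_cons.1 hp' with h | h
          · have hjq : ((j : Int)) = q := by
              have := congrArg Prod.snd h; simpa using this
            have hjn : j = q.toNat := by omega
            have hwv : w = v := by
              dsimp only at hj
              rw [hjn, hv] at hj
              have hvw : v = w := by injection hj
              omega
            exact Or.inr (Or.inl ⟨hjq, hwv⟩)
          · exact Or.inl ⟨p', h⟩
        · exact Or.inr (Or.inr hrel)
      have hmemL : ∀ i ∈ PySem.List.pyRange 0 (min (x - v) 10) 1,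
          0 ≤ i ∧ i < 10 ∧ v + i < x := by
        intro i hi
        rw [PySem.List.mem_pyRange_one] at hi
        have h1 : i < x - v := lt_of_lt_of_le hi.2 (min_le_left _ _)
        have h2 : i < 10 := lt_of_lt_of_le hi.2 (min_le_right _ _)
        exact ⟨hi.1, h2, by omega⟩
      obtain ⟨hW', hmono', hqs', hx', hm', htar', hC'⟩ :=
        A_fold m q v x hm hq0 hq1 hWit hX.2.1
          (PySem.List.pyRange 0 (min (x - v) 10) 1) (AState.mk vs rest x) hmemL hAW0
          (le_refl x)
      set s' := (PySem.List.pyRange 0 (min (x - v) 10) 1).foldl (A_body m q v)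
        (AState.mk vs rest x) with hs'
      have hgoal : A_loop m (fuel + 1) (AState.mk vs ((p, q) :: rest) x) =
          A_loop m fuel s' := by
        show (match vs.getD q.toNat none with
          | none => x
          | some v => A_loop m fuel ((PySem.List.pyRange 0 (min (x - v) 10) 1).foldl
              (A_body m q v) (AState.mk vs rest x))) = A_loop m fuel s'
        rw [hv']
      rw [hgoal]
      -- rebuild the full invariant for s'
      obtain ⟨hL2, hS2, hX2, hQ2, hR2, hB52, hZ2⟩ := hW'
      have hInv' : AInv m s' := by
        refine ⟨hL2, hS2, hX2, hQ2, ?_, hB52, hZ2⟩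
        intro j w hj
        rcases hR2 j w hj with h | ⟨hjq, hwv⟩ | h
        · exact Or.inl h
        · rcases hC' with hsame | ⟨p', hp'⟩
          · right
            intro i hi0 hi1
            by_cases hiK : i < min (x - v) 10
            · obtain ⟨w', hw1', hw2'⟩ := htar' i (PySem.List.mem_pyRange_one.2 ⟨hi0, hiK⟩)
              right
              refine ⟨w', ?_, by omega⟩
              rw [hjq, show (10 : Int) * q + i = q * 10 + i by ring]
              exact hw1'
            · left
              have hxv : x - v ≤ i := by omega
              have : s'.x ≤ x := hx'
              omega
          · exact Or.inl ⟨p', by rw [hjq]; exact hp'⟩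
        · exact Or.inr h
      have hmeas' : Ameas (A_sumDigits m) s' < fuel := by
        have h1 : Ameas (A_sumDigits m) (AState.mk vs rest x) + 1 =
            Ameas (A_sumDigits m) (AState.mk vs ((p, q) :: rest) x) := by
          unfold Ameas
          simp
          omega
        omega
      exact IH s' hInv' hmeas'

theorem vget_replicate_none (k j : Nat) : vget (List.replicate k (none : Option Int)) j = none := by
  by_cases h : j < k
  · simp [vget, List.getD, h]
  · exact vget_none_of_ge _ _ (by simpa using Nat.le_of_not_lt h)

theorem A_init_go (m : Int) (hm : 1 ≤ m) :
    ∀ (L : List Int) (vs0 : List (Option Int)) (qs0 : List (Int × Int)),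
    (∀ i ∈ L, 1 ≤ i ∧ i < min m 10) →
    vs0.length = m.toNat →
    (∀ (j : Nat) (w : Int), vget vs0 j = some w →
      ∃ i : Int, 1 ≤ i ∧ i < min m 10 ∧ j = i.toNat ∧ w = i ∧ (i, i) ∈ qs0) →
    (∀ e ∈ qs0, ∃ i : Int, 1 ≤ i ∧ i < min m 10 ∧ e = (i, i) ∧ vget vs0 i.toNat = some i) →
    vget vs0 0 = none →
    ((L.foldl (fun (s : List (Option Int) × List (Int × Int)) i =>
        (s.1.set i.toNat (some i), A_hpush s.2 (i, i))) (vs0, qs0)).1.length = m.toNat ∧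
     (∀ (j : Nat) (w : Int), vget (L.foldl (fun s i =>
        (s.1.set i.toNat (some i), A_hpush s.2 (i, i))) (vs0, qs0)).1 j = some w →
       ∃ i : Int, 1 ≤ i ∧ i < min m 10 ∧ j = i.toNat ∧ w = i ∧ (i, i) ∈ (L.foldl (fun s i =>
        (s.1.set i.toNat (some i), A_hpush s.2 (i, i))) (vs0, qs0)).2) ∧
     (∀ e ∈ (L.foldl (fun s i =>
        (s.1.set i.toNat (some i), A_hpush s.2 (i, i))) (vs0, qs0)).2,
       ∃ i : Int, 1 ≤ i ∧ i < min m 10 ∧ e = (i, i) ∧ vget (L.foldl (fun s i =>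
        (s.1.set i.toNat (some i), A_hpush s.2 (i, i))) (vs0, qs0)).1 i.toNat = some i) ∧
     vget (L.foldl (fun s i =>
        (s.1.set i.toNat (some i), A_hpush s.2 (i, i))) (vs0, qs0)).1 0 = none ∧
     (∀ (j : Nat), vget vs0 j ≠ none → vget (L.foldl (fun s i =>
        (s.1.set i.toNat (some i), A_hpush s.2 (i, i))) (vs0, qs0)).1 j ≠ none) ∧
     (∀ i ∈ L, vget (L.foldl (fun s i =>
        (s.1.set i.toNat (some i), A_hpush s.2 (i, i))) (vs0, qs0)).1 i.toNat ≠ none)) := by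
  intro L
  induction L with
  | nil =>
    intro vs0 qs0 _ h1 h2 h3 h4
    exact ⟨h1, h2, h3, h4, fun j h => h, by simp⟩
  | cons a L ih =>
    intro vs0 qs0 hmem h1 h2 h3 h4
    obtain ⟨ha1, ha2⟩ := hmem a (List.mem_cons_self ..)
    have ha0 : (0:Int) ≤ a := by omega
    have halen : a.toNat < vs0.length := by omega
    have hac : ((a.toNat : Int)) = a := Int.toNat_of_nonneg ha0
    simp only [List.foldl_cons]
    have step2 := ih (vs0.set a.toNat (some a)) (A_hpush qs0 (a, a))
      (fun i hi => hmem i (List.mem_cons.2 (Or.inr hi)))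
      (by simpa using h1)
      (by
        intro j w hj
        by_cases hja : j = a.toNat
        · subst hja
          rw [vget_set_eq _ _ _ halen] at hj
          have : a = w := by injection hj
          exact ⟨a, ha1, ha2, rfl, by omega, mem_A_hpush_self ..⟩
        · rw [vget_set_ne _ _ _ _ hja] at hj
          obtain ⟨i, hi1, hi2, hi3, hi4, hi5⟩ := h2 j w hj
          exact ⟨i, hi1, hi2, hi3, hi4, mem_A_hpush _ _ _ hi5⟩)
      (by
        intro e he
        rcases mem_of_mem_A_hpush _ _ _ he with h | h
        · subst h
          exact ⟨a, ha1, ha2, rfl, vget_set_eq _ _ _ halen⟩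
        · obtain ⟨i, hi1, hi2, hi3, hi4⟩ := h3 e h
          refine ⟨i, hi1, hi2, hi3, ?_⟩
          by_cases hja : i.toNat = a.toNat
          · have : i = a := by omega
            subst this
            rw [vget_set_eq _ _ _ halen]
          · rw [vget_set_ne _ _ _ _ hja]
            exact hi4)
      (by
        rw [vget_set_ne _ _ _ _ (by omega : (0:Nat) ≠ a.toNat)]
        exact h4)
    obtain ⟨c1, c2, c3, c4, c5, c6⟩ := step2
    refine ⟨c1, c2, c3, c4, ?_, ?_⟩
    · intro j hj
      apply c5
      by_cases hja : j = a.toNat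
      · subst hja
        rw [vget_set_eq _ _ _ halen]
        simp
      · rw [vget_set_ne _ _ _ _ hja]
        exact hj
    · intro i hi
      rcases List.mem_cons.1 hi with h | h
      · subst h
        apply c5
        rw [vget_set_eq _ _ _ halen]
        simp
      · exact c6 i h

theorem A_init_inv (m : Int) (hm : 1 ≤ m) :
    AInv m (AState.mk (A_init m).1 (A_init m).2 (A_sumDigits m)) := by
  unfold A_init
  have hmem : ∀ i ∈ PySem.List.pyRange 1 (min m 10) 1, 1 ≤ i ∧ i < min m 10 := by
    intro i hi
    rw [PySem.List.mem_pyRange_one] at hi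
    exact hi
  obtain ⟨c1, c2, c3, c4, c5, c6⟩ := A_init_go m hm (PySem.List.pyRange 1 (min m 10) 1)
    (List.replicate m.toNat (none : Option Int)) [] hmem (by simp)
    (by intro j w hj; rw [vget_replicate_none] at hj; simp at hj)
    (by simp) (vget_replicate_none _ _)
  refine ⟨c1, ?_, ⟨ds_nonneg m, le_refl _, ⟨m, hm, Int.emod_self, rfl⟩⟩, ?_, ?_, ?_, ?_⟩
  · intro j w hj
    obtain ⟨i, hi1, hi2, hi3, hi4, hi5⟩ := c2 j w hj
    refine ⟨by omega, i, hi1, ?_, ?_⟩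
    · rw [hi3, Int.toNat_of_nonneg (by omega : (0:Int) ≤ i)]
      exact Int.emod_eq_of_lt (by omega) (by omega)
    · rw [hi4]
      exact ds_small i (by omega) (by omega)
  · intro p q hpq
    obtain ⟨i, hi1, hi2, hi3, hi4⟩ := c3 _ hpq
    rw [Prod.mk.injEq] at hi3
    obtain ⟨hp, hq⟩ := hi3
    exact ⟨by omega, by omega, i, by rw [hq]; exact hi4⟩
  · intro j w hj
    obtain ⟨i, hi1, hi2, hi3, hi4, hi5⟩ := c2 j w hj
    left
    refine ⟨i, ?_⟩
    have hji : ((j : Int)) = i := by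
      rw [hi3, Int.toNat_of_nonneg (by omega : (0:Int) ≤ i)]
    rw [hji]
    exact hi5
  · intro d hd1 hd2
    have hne := c6 d (PySem.List.mem_pyRange_one.2 ⟨hd1, hd2⟩)
    cases hcell : vget (((PySem.List.pyRange 1 (min m 10) 1).foldl (fun s i =>
        (s.1.set i.toNat (some i), A_hpush s.2 (i, i)))
        (List.replicate m.toNat (none : Option Int), ([] : List (Int × Int))))).1 d.toNat with
    | none => exact absurd hcell hne
    | some w =>
      obtain ⟨i, hi1, hi2, hi3, hi4, hi5⟩ := c2 _ w hcell
      have hid : i = d := by omega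
      exact ⟨w, rfl, by omega⟩
  · intro w hw
    dsimp only at hw
    rw [c4] at hw
    simp at hw

-- ===== B-side invariants =====

def relaxedB (m : Int) (dist : List Int) (j : Nat) : Prop :=
  dget dist ((10 * (j : Int)) % m).toNat ≤ dget dist j ∧
  dget dist (((j : Int) + 1) % m).toNat ≤ dget dist j + 1

def BFinal (m cap : Int) (dist : List Int) : Prop :=
  dist.length = m.toNat ∧
  (∀ j : Nat, j < dist.length → 0 ≤ dget dist j ∧ dget dist j ≤ cap + 1) ∧
  (∀ j : Nat, j < dist.length → dget dist j ≤ cap →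
    ∃ N : Int, 1 ≤ N ∧ N % m = (j : Int) ∧ A_sumDigits N ≤ dget dist j) ∧
  dget dist (1 % m).toNat ≤ 1 ∧
  (∀ j : Nat, j < dist.length → relaxedB m dist j)

def BInv (m cap : Int) (dist : List Int) (front back : List Int) : Prop :=
  dist.length = m.toNat ∧
  (∀ j : Nat, j < dist.length → 0 ≤ dget dist j ∧ dget dist j ≤ cap + 1) ∧
  (∀ j : Nat, j < dist.length → dget dist j ≤ cap →
    ∃ N : Int, 1 ≤ N ∧ N % m = (j : Int) ∧ A_sumDigits N ≤ dget dist j) ∧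
  dget dist (1 % m).toNat ≤ 1 ∧
  (∀ r ∈ front, 0 ≤ r ∧ r < m) ∧ (∀ r ∈ back, 0 ≤ r ∧ r < m) ∧
  (∀ j : Nat, j < dist.length →
    ((j : Int) ∈ front ∨ (j : Int) ∈ back) ∨ relaxedB m dist j)

def Bmeas (dist front back : List Int) : Nat :=
  3 * (dist.map Int.toNat).sum + 2 * (front.length + back.length) +
    (if front = [] ∧ back ≠ [] then 1 else 0)

theorem B_write (m cap : Int) (hm : 1 ≤ m) (dist : List Int) (t c : Int)
    (ht0 : 0 ≤ t) (ht1 : t < m) (hL : dist.length = m.toNat)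
    (hB : ∀ j : Nat, j < dist.length → 0 ≤ dget dist j ∧ dget dist j ≤ cap + 1)
    (hS : ∀ j : Nat, j < dist.length → dget dist j ≤ cap →
      ∃ N : Int, 1 ≤ N ∧ N % m = (j : Int) ∧ A_sumDigits N ≤ dget dist j)
    (hONE : dget dist (1 % m).toNat ≤ 1)
    (hwit : ∃ N : Int, 1 ≤ N ∧ N % m = t ∧ A_sumDigits N ≤ c)
    (hc0 : 0 ≤ c) (hlt : c < dget dist t.toNat) :
    (dist.set t.toNat c).length = m.toNat ∧
    (∀ j : Nat, j < dist.length → 0 ≤ dget (dist.set t.toNat c) j ∧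
      dget (dist.set t.toNat c) j ≤ cap + 1) ∧
    (∀ j : Nat, j < dist.length → dget (dist.set t.toNat c) j ≤ cap →
      ∃ N : Int, 1 ≤ N ∧ N % m = (j : Int) ∧ A_sumDigits N ≤ dget (dist.set t.toNat c) j) ∧
    dget (dist.set t.toNat c) (1 % m).toNat ≤ 1 ∧
    (∀ j : Nat, dget (dist.set t.toNat c) j ≤ dget dist j) ∧
    (3 * ((dist.set t.toNat c).map Int.toNat).sum + 3 ≤ 3 * (dist.map Int.toNat).sum) := by
  have htlen : t.toNat < dist.length := by omega
  have hcast : ((t.toNat : Int)) = t := Int.toNat_of_nonneg ht0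
  have hset_eq := dget_set_eq dist t.toNat c htlen
  refine ⟨by simp [hL], ?_, ?_, ?_, ?_, sum_toNat_set dist t.toNat c htlen hc0 hlt⟩
  · intro j hj
    by_cases hjt : j = t.toNat
    · subst hjt
      rw [hset_eq]
      have := (hB t.toNat htlen).2
      omega
    · rw [dget_set_ne dist t.toNat j c hjt]
      exact hB j hj
  · intro j hj hle
    by_cases hjt : j = t.toNat
    · subst hjt
      rw [hset_eq] at hle ⊢
      obtain ⟨N, hN1, hN2, hN3⟩ := hwit
      exact ⟨N, hN1, by rw [hN2, hcast], hN3⟩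
    · rw [dget_set_ne dist t.toNat j c hjt] at hle ⊢
      exact hS j hj hle
  · by_cases hjt : (1 % m).toNat = t.toNat
    · rw [hjt, hset_eq]
      rw [← hjt] at hlt
      omega
    · rw [dget_set_ne dist t.toNat _ c hjt]
      exact hONE
  · intro j
    by_cases hjt : j = t.toNat
    · subst hjt; rw [hset_eq]; omega
    · rw [dget_set_ne dist t.toNat j c hjt]

theorem B_step (m cap : Int) (hm : 1 ≤ m) (hcap : cap = A_sumDigits m)
    (dist front' back : List Int) (r : Int)
    (hInv : BInv m cap dist (r :: front') back) :
    ∃ dist2 front2 back2,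
      (∀ fuel : Nat, B_loop m (fuel + 1) dist (r :: front') back =
        B_loop m fuel dist2 front2 back2) ∧
      BInv m cap dist2 front2 back2 ∧
      Bmeas dist2 front2 back2 < Bmeas dist (r :: front') back := by
  obtain ⟨hL, hB, hS, hONE, hQf, hQb, hR⟩ := hInv
  have hm' : (0:Int) < m := by omega
  obtain ⟨hr0, hr1⟩ := hQf r (List.mem_cons_self ..)
  have hrlen : r.toNat < dist.length := by omega
  have ht1 : PySem.Int.mod (r * 10) m = (r * 10) % m := PySem.Int.mod_eq_emod_of_pos hm'
  have ht2 : PySem.Int.mod (r + 1) m = (r + 1) % m := PySem.Int.mod_eq_emod_of_pos hm'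
  have ht10 : 0 ≤ (r * 10) % m := Int.emod_nonneg _ (by omega)
  have ht11 : (r * 10) % m < m := Int.emod_lt_of_pos _ hm'
  have ht20 : 0 ≤ (r + 1) % m := Int.emod_nonneg _ (by omega)
  have ht21 : (r + 1) % m < m := Int.emod_lt_of_pos _ hm'
  have ht1len : ((r * 10) % m).toNat < dist.length := by omega
  have ht2len : ((r + 1) % m).toNat < dist.length := by omega
  have hd0 : 0 ≤ dget dist r.toNat := (hB _ hrlen).1
  have hrc : ((r.toNat : Int)) = r := Int.toNat_of_nonneg hr0
  have ht1c : ((((r * 10) % m).toNat : Int)) = (r * 10) % m := Int.toNat_of_nonneg ht10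
  have ht2c : ((((r + 1) % m).toNat : Int)) = (r + 1) % m := Int.toNat_of_nonneg ht20
  -- witness transfer for the two edges
  have hwitA : dget dist r.toNat ≤ cap →
      ∃ N : Int, 1 ≤ N ∧ N % m = (r * 10) % m ∧ A_sumDigits N ≤ dget dist r.toNat := by
    intro hdc
    obtain ⟨N, hN1, hN2, hN3⟩ := hS r.toNat hrlen hdc
    have hNr : N % m = r := by rw [hN2, hrc]
    refine ⟨10 * N, by omega, ?_, ?_⟩
    · calc (10 * N) % m = (10 * (N % m)) % m := (emod_ten_shift_zero N m).symm
        _ = (10 * r) % m := by rw [hNr]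
        _ = (r * 10) % m := by ring_nf
    · rw [show (10 : Int) * N = 10 * N + 0 by ring, ds_step N 0 (by omega) (by omega) (by omega)]
      omega
  have hwitB : dget dist r.toNat ≤ cap →
      ∃ N : Int, 1 ≤ N ∧ N % m = (r + 1) % m ∧ A_sumDigits N ≤ dget dist r.toNat + 1 := by
    intro hdc
    obtain ⟨N, hN1, hN2, hN3⟩ := hS r.toNat hrlen hdc
    have hNr : N % m = r := by rw [hN2, hrc]
    refine ⟨N + 1, by omega, ?_, ?_⟩
    · calc (N + 1) % m = (N % m + 1) % m := (emod_succ_shift N m).symm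
        _ = (r + 1) % m := by rw [hNr]
    · have := ds_succ_le N (by omega)
      omega
  by_cases hw1 : dist.getD r.toNat 0 < dist.getD ((r * 10) % m).toNat 0
  · -- first edge writes
    have hw1' : dget dist r.toNat < dget dist ((r * 10) % m).toNat := hw1
    have hne1r : ((r * 10) % m).toNat ≠ r.toNat := by
      intro he; rw [he] at hw1'; omega
    have hdcap : dget dist r.toNat ≤ cap := by
      have := (hB _ ht1len).2; omega
    obtain ⟨hL1, hB1, hS1, hONE1, hmono1, hsum1⟩ :=
      B_write m cap hm dist ((r * 10) % m) (dget dist r.toNat) ht10 ht11 hL hB hS hONE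
        (hwitA hdcap) hd0 hw1'
    set dist1 := dist.set ((r * 10) % m).toNat (dget dist r.toNat) with hdist1
    have hlen1 : dist1.length = dist.length := by simp [hdist1]
    have hr1v : dget dist1 r.toNat = dget dist r.toNat :=
      dget_set_ne dist _ r.toNat _ (fun h => hne1r h.symm)
    by_cases hw2 : dist.getD r.toNat 0 + 1 <
        (dist.set ((r * 10) % m).toNat (dist.getD r.toNat 0)).getD ((r + 1) % m).toNat 0
    · -- both edges write
      have hw2' : dget dist r.toNat + 1 < dget dist1 ((r + 1) % m).toNat := hw2
      have hne21 : ((r + 1) % m).toNat ≠ ((r * 10) % m).toNat := by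
        intro he
        rw [he, show dget dist1 ((r * 10) % m).toNat = dget dist r.toNat from
          dget_set_eq dist _ _ ht1len] at hw2'
        omega
      have hne2r : ((r + 1) % m).toNat ≠ r.toNat := by
        intro he; rw [he, hr1v] at hw2'; omega
      have hd1cap : dget dist r.toNat + 1 ≤ cap := by
        have := (hB1 _ (by omega)).2; omega
      obtain ⟨N2, hN21, hN22, hN23⟩ := hwitB (by omega)
      obtain ⟨hL2, hB2, hS2, hONE2, hmono2, hsum2⟩ :=
        B_write m cap hm dist1 ((r + 1) % m) (dget dist r.toNat + 1) ht20 ht21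
          (by omega) (fun j hj => hB1 j (by omega)) (fun j hj => hS1 j (by omega)) hONE1
          ⟨N2, hN21, hN22, hN23⟩ (by omega) hw2'
      set dist2 := dist1.set (((r + 1) % m)).toNat (dget dist r.toNat + 1) with hdist2
      have hlen2 : dist2.length = dist.length := by simp [hdist2, hlen1]
      refine ⟨dist2, (r * 10) % m :: front', (r + 1) % m :: back, ?_, ?_, ?_⟩
      · intro fuel
        conv_lhs => rw [B_loop]
        rw [ht1, ht2, if_pos hw1, if_pos hw2]
        exact rfl
      · -- BInv
        have hr2v : dget dist2 r.toNat = dget dist r.toNat := by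
          rw [hdist2, dget_set_ne dist1 _ r.toNat _ (fun h => hne2r h.symm), hr1v]
        have ht1v : dget dist2 ((r * 10) % m).toNat = dget dist r.toNat := by
          rw [hdist2, dget_set_ne dist1 _ _ _ (fun h => hne21 h.symm), hdist1,
            dget_set_eq dist _ _ ht1len]
        have ht2v : dget dist2 ((r + 1) % m).toNat = dget dist r.toNat + 1 := by
          rw [hdist2, dget_set_eq dist1 _ _ (by omega)]
        refine ⟨by omega, fun j hj => hB2 j (by omega), fun j hj => hS2 j (by omega),
          hONE2, ?_, ?_, ?_⟩
        · intro r' hr'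
          rcases List.mem_cons.1 hr' with h | h
          · subst h; exact ⟨ht10, ht11⟩
          · exact hQf r' (List.mem_cons.2 (Or.inr h))
        · intro r' hr'
          rcases List.mem_cons.1 hr' with h | h
          · subst h; exact ⟨ht20, ht21⟩
          · exact hQb r' h
        · intro j hj
          have hjlen : j < dist.length := by omega
          by_cases hj1 : j = ((r * 10) % m).toNat
          · exact Or.inl (Or.inl (by rw [hj1, ht1c]; exact List.mem_cons_self ..))
          by_cases hj2 : j = ((r + 1) % m).toNat
          · exact Or.inl (Or.inr (by rw [hj2, ht2c]; exact List.mem_cons_self ..))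
          have hjv : dget dist2 j = dget dist j := by
            rw [hdist2, dget_set_ne dist1 _ j _ hj2, hdist1, dget_set_ne dist _ j _ hj1]
          by_cases hjr : j = r.toNat
          · -- r is now relaxed
            refine Or.inr ⟨?_, ?_⟩
            · have e1 : dget dist2 ((10 * (j:Int)) % m).toNat = dget dist r.toNat := by
                rw [hjr, hrc, show (10 : Int) * r = r * 10 by ring]; exact ht1v
              have e2 : dget dist2 j = dget dist r.toNat := by rw [hjr]; exact hr2v
              omega
            · have e1 : dget dist2 (((j:Int) + 1) % m).toNat = dget dist r.toNat + 1 := by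
                rw [hjr, hrc]; exact ht2v
              have e2 : dget dist2 j = dget dist r.toNat := by rw [hjr]; exact hr2v
              omega
          · rcases hR j hjlen with h | h
            · rcases h with h | h
              · rcases List.mem_cons.1 h with h' | h'
                · exact absurd (by omega : j = r.toNat) hjr
                · exact Or.inl (Or.inl (List.mem_cons.2 (Or.inr h')))
              · exact Or.inl (Or.inr (List.mem_cons.2 (Or.inr h)))
            · refine Or.inr ⟨?_, ?_⟩
              · rw [hjv]
                calc dget dist2 ((10 * (j:Int)) % m).toNat
                    ≤ dget dist1 ((10 * (j:Int)) % m).toNat := hmono2 _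
                  _ ≤ dget dist ((10 * (j:Int)) % m).toNat := hmono1 _
                  _ ≤ dget dist j := h.1
              · rw [hjv]
                calc dget dist2 (((j:Int) + 1) % m).toNat
                    ≤ dget dist1 (((j:Int) + 1) % m).toNat := hmono2 _
                  _ ≤ dget dist (((j:Int) + 1) % m).toNat := hmono1 _
                  _ ≤ dget dist j + 1 := h.2
      · -- measure
        unfold Bmeas
        rw [if_neg (by simp : ¬((r :: front' : List Int) = [] ∧ back ≠ []))]
        have hind : (if ((r * 10) % m :: front' : List Int) = [] ∧
            ((r + 1) % m :: back : List Int) ≠ [] then 1 else 0) = 0 := by simp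
        rw [hind]
        simp only [List.length_cons]
        omega
    · -- only first edge writes
      have hw2' : ¬ dget dist r.toNat + 1 < dget dist1 ((r + 1) % m).toNat := hw2
      refine ⟨dist1, (r * 10) % m :: front', back, ?_, ?_, ?_⟩
      · intro fuel
        conv_lhs => rw [B_loop]
        rw [ht1, ht2, if_pos hw1, if_neg hw2]
        exact rfl
      · refine ⟨by omega, fun j hj => hB1 j (by omega), fun j hj => hS1 j (by omega),
          hONE1, ?_, hQb, ?_⟩
        · intro r' hr'
          rcases List.mem_cons.1 hr' with h | h
          · subst h; exact ⟨ht10, ht11⟩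
          · exact hQf r' (List.mem_cons.2 (Or.inr h))
        · intro j hj
          have hjlen : j < dist.length := by omega
          by_cases hj1 : j = ((r * 10) % m).toNat
          · exact Or.inl (Or.inl (by rw [hj1, ht1c]; exact List.mem_cons_self ..))
          have hjv : dget dist1 j = dget dist j := by
            rw [hdist1, dget_set_ne dist _ j _ hj1]
          by_cases hjr : j = r.toNat
          · refine Or.inr ⟨?_, ?_⟩
            · have e1 : dget dist1 ((10 * (j:Int)) % m).toNat = dget dist r.toNat := by
                rw [hjr, hrc, show (10 : Int) * r = r * 10 by ring, hdist1]
                exact dget_set_eq dist _ _ ht1len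
              have e2 : dget dist1 j = dget dist r.toNat := by rw [hjr]; exact hr1v
              omega
            · have e1 : ¬ dget dist r.toNat + 1 < dget dist1 (((j:Int) + 1) % m).toNat := by
                rw [hjr, hrc]; exact hw2'
              have e2 : dget dist1 j = dget dist r.toNat := by rw [hjr]; exact hr1v
              omega
          · rcases hR j hjlen with h | h
            · rcases h with h | h
              · rcases List.mem_cons.1 h with h' | h'
                · exact absurd (by omega : j = r.toNat) hjr
                · exact Or.inl (Or.inl (List.mem_cons.2 (Or.inr h')))
              · exact Or.inl (Or.inr h)
            · refine Or.inr ⟨?_, ?_⟩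
              · rw [hjv]
                calc dget dist1 ((10 * (j:Int)) % m).toNat
                    ≤ dget dist ((10 * (j:Int)) % m).toNat := hmono1 _
                  _ ≤ dget dist j := h.1
              · rw [hjv]
                calc dget dist1 (((j:Int) + 1) % m).toNat
                    ≤ dget dist (((j:Int) + 1) % m).toNat := hmono1 _
                  _ ≤ dget dist j + 1 := h.2
      · unfold Bmeas
        rw [if_neg (by simp : ¬((r :: front' : List Int) = [] ∧ back ≠ []))]
        have hind : (if ((r * 10) % m :: front' : List Int) = [] ∧ back ≠ [] then 1 else 0)
            = 0 := by simp
        rw [hind]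
        simp only [List.length_cons]
        omega
  · -- first edge does not write
    have hw1' : ¬ dget dist r.toNat < dget dist ((r * 10) % m).toNat := hw1
    by_cases hw2 : dist.getD r.toNat 0 + 1 < dist.getD ((r + 1) % m).toNat 0
    · -- only second edge writes
      have hw2' : dget dist r.toNat + 1 < dget dist ((r + 1) % m).toNat := hw2
      have hne2r : ((r + 1) % m).toNat ≠ r.toNat := by
        intro he; rw [he] at hw2'; omega
      have hdcap : dget dist r.toNat + 1 ≤ cap := by
        have := (hB _ ht2len).2; omega
      obtain ⟨N2, hN21, hN22, hN23⟩ := hwitB (by omega)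
      obtain ⟨hL2, hB2, hS2, hONE2, hmono2, hsum2⟩ :=
        B_write m cap hm dist ((r + 1) % m) (dget dist r.toNat + 1) ht20 ht21 hL hB hS hONE
          ⟨N2, hN21, hN22, hN23⟩ (by omega) hw2'
      set dist2 := dist.set (((r + 1) % m)).toNat (dget dist r.toNat + 1) with hdist2
      have hr2v : dget dist2 r.toNat = dget dist r.toNat := by
        rw [hdist2, dget_set_ne dist _ r.toNat _ (fun h => hne2r h.symm)]
      refine ⟨dist2, front', (r + 1) % m :: back, ?_, ?_, ?_⟩
      · intro fuel
        conv_lhs => rw [B_loop]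
        rw [ht1, ht2, if_neg hw1, if_pos hw2]
        exact rfl
      · refine ⟨by omega, fun j hj => hB2 j (by omega), fun j hj => hS2 j (by omega),
          hONE2, fun r' hr' => hQf r' (List.mem_cons.2 (Or.inr hr')), ?_, ?_⟩
        · intro r' hr'
          rcases List.mem_cons.1 hr' with h | h
          · subst h; exact ⟨ht20, ht21⟩
          · exact hQb r' h
        · intro j hj
          have hjlen : j < dist.length := by omega
          by_cases hj2 : j = ((r + 1) % m).toNat
          · exact Or.inl (Or.inr (by rw [hj2, ht2c]; exact List.mem_cons_self ..))
          have hjv : dget dist2 j = dget dist j := by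
            rw [hdist2, dget_set_ne dist _ j _ hj2]
          by_cases hjr : j = r.toNat
          · refine Or.inr ⟨?_, ?_⟩
            · have e1 : dget dist2 ((10 * (j:Int)) % m).toNat ≤ dget dist ((r * 10) % m).toNat := by
                rw [hjr, hrc, show (10 : Int) * r = r * 10 by ring]; exact hmono2 _
              have e2 : dget dist2 j = dget dist r.toNat := by rw [hjr]; exact hr2v
              omega
            · have e1 : dget dist2 (((j:Int) + 1) % m).toNat = dget dist r.toNat + 1 := by
                rw [hjr, hrc, hdist2]; exact dget_set_eq dist _ _ ht2len
              have e2 : dget dist2 j = dget dist r.toNat := by rw [hjr]; exact hr2v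
              omega
          · rcases hR j hjlen with h | h
            · rcases h with h | h
              · rcases List.mem_cons.1 h with h' | h'
                · exact absurd (by omega : j = r.toNat) hjr
                · exact Or.inl (Or.inl h')
              · exact Or.inl (Or.inr (List.mem_cons.2 (Or.inr h)))
            · refine Or.inr ⟨?_, ?_⟩
              · rw [hjv]
                calc dget dist2 ((10 * (j:Int)) % m).toNat
                    ≤ dget dist ((10 * (j:Int)) % m).toNat := hmono2 _
                  _ ≤ dget dist j := h.1
              · rw [hjv]
                calc dget dist2 (((j:Int) + 1) % m).toNat
                    ≤ dget dist (((j:Int) + 1) % m).toNat := hmono2 _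
                  _ ≤ dget dist j + 1 := h.2
      · unfold Bmeas
        rw [if_neg (by simp : ¬((r :: front' : List Int) = [] ∧ back ≠ []))]
        have hind : (if (front' : List Int) = [] ∧ ((r + 1) % m :: back : List Int) ≠ []
            then 1 else 0) ≤ 1 := by split <;> omega
        simp only [List.length_cons]
        omega
    · -- neither edge writes
      have hw2' : ¬ dget dist r.toNat + 1 < dget dist ((r + 1) % m).toNat := hw2
      refine ⟨dist, front', back, ?_, ?_, ?_⟩
      · intro fuel
        conv_lhs => rw [B_loop]
        rw [ht1, ht2, if_neg hw1, if_neg hw2]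
      · refine ⟨hL, hB, hS, hONE, fun r' hr' => hQf r' (List.mem_cons.2 (Or.inr hr')),
          hQb, ?_⟩
        intro j hj
        by_cases hjr : j = r.toNat
        · refine Or.inr ⟨?_, ?_⟩
          · have e1 : ¬ dget dist r.toNat < dget dist ((10 * (j:Int)) % m).toNat := by
              rw [hjr, hrc, show (10 : Int) * r = r * 10 by ring]; exact hw1'
            have e2 : dget dist j = dget dist r.toNat := by rw [hjr]
            omega
          · have e1 : ¬ dget dist r.toNat + 1 < dget dist (((j:Int) + 1) % m).toNat := by
              rw [hjr, hrc]; exact hw2'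
            have e2 : dget dist j = dget dist r.toNat := by rw [hjr]
            omega
        · rcases hR j hj with h | h
          · rcases h with h | h
            · rcases List.mem_cons.1 h with h' | h'
              · exact absurd (by omega : j = r.toNat) hjr
              · exact Or.inl (Or.inl h')
            · exact Or.inl (Or.inr h)
          · exact Or.inr h
      · unfold Bmeas
        rw [if_neg (by simp : ¬((r :: front' : List Int) = [] ∧ back ≠ []))]
        have hind : (if (front' : List Int) = [] ∧ back ≠ [] then 1 else 0) ≤ 1 := by
          split <;> omega
        simp only [List.length_cons]
        omega

theorem B_run (m cap : Int) (hm : 1 ≤ m) (hcap : cap = A_sumDigits m) :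
    ∀ (fuel : Nat) (dist front back : List Int), BInv m cap dist front back →
      Bmeas dist front back < fuel → BFinal m cap (B_loop m fuel dist front back) := by
  intro fuel
  induction fuel with
  | zero => intro dist front back _ hlt; omega
  | succ fuel IH =>
    intro dist front back hInv hlt
    obtain ⟨hL, hB, hS, hONE, hQf, hQb, hR⟩ := hInv
    cases front with
    | nil =>
      cases back with
      | nil =>
        show BFinal m cap dist
        refine ⟨hL, hB, hS, hONE, fun j hj => ?_⟩
        rcases hR j hj with h | h
        · rcases h with h | h <;> simp at h
        · exact h
      | cons b bs =>
        show BFinal m cap (B_loop m fuel dist (b :: bs).reverse [])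
        apply IH
        · refine ⟨hL, hB, hS, hONE, fun r hr => hQb r (by rw [List.mem_reverse] at hr; exact hr), by simp, ?_⟩
          intro j hj
          rcases hR j hj with h | h
          · rcases h with h | h
            · simp at h
            · exact Or.inl (Or.inl (by rw [List.mem_reverse]; exact h))
          · exact Or.inr h
        · have h1 : ¬((b :: bs).reverse = [] ∧ ([] : List Int) ≠ []) := by simp
          unfold Bmeas at hlt ⊢
          rw [if_neg h1, if_pos (by simp : ([] : List Int) = [] ∧ (b :: bs) ≠ [])] at *
          simp only [List.length_reverse, List.length_nil, List.length_cons] at *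
          omega
    | cons r front'' =>
      obtain ⟨dist2, front2, back2, hEq, hInv2, hMu⟩ :=
        B_step m cap hm hcap dist front'' back r ⟨hL, hB, hS, hONE, hQf, hQb, hR⟩
      rw [hEq fuel]
      exact IH dist2 front2 back2 hInv2 (by omega)

theorem B_chain (m cap : Int) (hm : 1 ≤ m) (dist : List Int) (hF : BFinal m cap dist) :
    ∀ (k : Nat) (b : Int), 0 ≤ b →
      dget dist ((b + k) % m).toNat ≤ dget dist (b % m).toNat + k := by
  obtain ⟨hL, hB, hS, hONE, hRel⟩ := hF
  intro k
  induction k with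
  | zero => intro b hb; simp
  | succ k ih =>
    intro b hb
    have hmem : ((b + k) % m).toNat < dist.length := by
      have h1 := Int.emod_nonneg (b + k) (by omega : m ≠ 0)
      have h2 := Int.emod_lt_of_pos (b + k) (by omega : 0 < m)
      omega
    have hrel := (hRel _ hmem).2
    have hcast : (((((b + (k:Int)) % m).toNat : Int))) = (b + k) % m := by
      have := Int.emod_nonneg (b + k) (by omega : m ≠ 0)
      omega
    rw [hcast, emod_succ_shift] at hrel
    have := ih b hb
    have hstep : ((b + (k:Int)) + 1) = b + ((k:Nat) + 1 : Nat) := by push_cast; ring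
    rw [hstep] at hrel
    calc dget dist ((b + ((k:Nat)+1:Nat)) % m).toNat ≤ dget dist ((b + k) % m).toNat + 1 := hrel
      _ ≤ dget dist (b % m).toNat + k + 1 := by omega
      _ = dget dist (b % m).toNat + ((k:Nat)+1:Nat) := by push_cast; ring

theorem B_complete (m cap : Int) (hm : 1 ≤ m) (dist : List Int) (hF : BFinal m cap dist) :
    ∀ N : Int, 1 ≤ N → dget dist (N % m).toNat ≤ A_sumDigits N := by
  intro N hN
  induction hg : N.toNat using Nat.strong_induction_on generalizing N with
  | _ k IH =>
    obtain ⟨hL, hB, hS, hONE, hRel⟩ := hF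
    by_cases h10 : N < 10
    · -- N = 1 + (N-1); chain from dist[1 % m] ≤ 1
      have hch := B_chain m cap hm dist ⟨hL, hB, hS, hONE, hRel⟩ (N - 1).toNat 1 (by omega)
      have hc : (1 + ((N-1).toNat : Int)) = N := by omega
      rw [hc] at hch
      rw [ds_small N (by omega) h10]
      omega
    · -- N = 10*(N/10) + N%10
      have hN10 : 1 ≤ N / 10 := by omega
      have hIH := IH (N / 10).toNat (by omega) (N / 10) hN10 rfl
      -- ×10 edge at residue (N/10) % m
      have hmem : ((N / 10) % m).toNat < dist.length := by
        have h1 := Int.emod_nonneg (N / 10) (by omega : m ≠ 0)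
        have h2 := Int.emod_lt_of_pos (N / 10) (by omega : 0 < m)
        omega
      have hrel := (hRel _ hmem).1
      have hcast : ((((N / 10) % m).toNat : Int)) = (N / 10) % m := by
        have := Int.emod_nonneg (N / 10) (by omega : m ≠ 0)
        omega
      rw [hcast, emod_ten_shift_zero] at hrel
      -- chain of N % 10 unit edges from 10*(N/10)
      have hch := B_chain m cap hm dist ⟨hL, hB, hS, hONE, hRel⟩ (N % 10).toNat (10 * (N / 10))
        (by omega)
      have hc : (10 * (N / 10) + ((N % 10).toNat : Int)) = N := by omega
      rw [hc] at hch
      have hds : A_sumDigits N = A_sumDigits (N / 10) + N % 10 := by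
        have := ds_step (N / 10) (N % 10) (by omega) (by omega) (by omega)
        rw [show 10 * (N / 10) + N % 10 = N by omega] at this
        omega
      omega

def B_core (m : Int) : Int :=
  (B_loop m
    (3 * ((List.replicate m.toNat (B_digitSum m + 1)).set (PySem.Int.mod 1 m).toNat 1).foldl
        (fun a v => a + v.toNat) 0 + 3)
    ((List.replicate m.toNat (B_digitSum m + 1)).set (PySem.Int.mod 1 m).toNat 1)
    [PySem.Int.mod 1 m] []).getD 0 0

theorem f_alt_eq_core (n : Int) : f_alt n = B_core (B_strip5 (B_strip2 n)) := rfl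

theorem B_main (m : Int) (hm : 1 ≤ m) :
    (∃ N : Int, 1 ≤ N ∧ N % m = 0 ∧ A_sumDigits N ≤ B_core m) ∧
    ∀ N : Int, 1 ≤ N → N % m = 0 → B_core m ≤ A_sumDigits N := by
  have hm' : (0:Int) < m := by omega
  have hmod : PySem.Int.mod 1 m = 1 % m := PySem.Int.mod_eq_emod_of_pos hm'
  have h10 : 0 ≤ 1 % m := Int.emod_nonneg _ (by omega)
  have h11 : 1 % m < m := Int.emod_lt_of_pos _ hm'
  have hcap1 : 1 ≤ A_sumDigits m := ds_pos m hm
  have hcore : B_core m =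
      (B_loop m
        (3 * ((List.replicate m.toNat (A_sumDigits m + 1)).set (1 % m).toNat 1).foldl
            (fun a v => a + v.toNat) 0 + 3)
        ((List.replicate m.toNat (A_sumDigits m + 1)).set (1 % m).toNat 1)
        [1 % m] []).getD 0 0 := by
    unfold B_core
    rw [ds_eq_B, hmod]
  set cap := A_sumDigits m with hcapdef
  set dist0 := (List.replicate m.toNat (cap + 1)).set (1 % m).toNat 1 with hdist0
  have hlen0 : dist0.length = m.toNat := by simp [hdist0]
  have honecell : (1 % m).toNat < m.toNat := by omega
  have hget0 : ∀ j : Nat, j < m.toNat →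
      dget dist0 j = if j = (1 % m).toNat then 1 else cap + 1 := by
    intro j hj
    by_cases hje : j = (1 % m).toNat
    · subst hje
      rw [if_pos rfl, hdist0, dget_set_eq _ _ _ (by simpa using honecell)]
    · rw [if_neg hje, hdist0, dget_set_ne _ _ _ _ hje, dget_replicate _ _ _ hj]
  have hInv0 : BInv m cap dist0 [1 % m] [] := by
    refine ⟨hlen0, ?_, ?_, ?_, ?_, by simp, ?_⟩
    · intro j hj
      rw [hget0 j (by omega)]
      split <;> omega
    · intro j hj hle
      rw [hget0 j (by omega)] at hle ⊢
      by_cases hje : j = (1 % m).toNat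
      · refine ⟨1, by omega, ?_, ?_⟩
        · rw [hje]; omega
        · have hds1 : A_sumDigits 1 = 1 := ds_small 1 (by omega) (by omega)
          rw [if_pos hje]
          omega
      · rw [if_neg hje] at hle; omega
    · rw [hget0 _ honecell, if_pos rfl]
    · intro r hr
      rcases List.mem_cons.1 hr with h | h
      · subst h; exact ⟨h10, h11⟩
      · simp at h
    · intro j hj
      by_cases hje : j = (1 % m).toNat
      · refine Or.inl (Or.inl ?_)
        rw [hje, Int.toNat_of_nonneg h10]
        exact List.mem_cons_self ..
      · refine Or.inr ⟨?_, ?_⟩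
        · have hb1 : ((10 * (j:Int)) % m).toNat < m.toNat := by
            have := Int.emod_nonneg (10 * (j:Int)) (by omega : m ≠ 0)
            have := Int.emod_lt_of_pos (10 * (j:Int)) hm'
            omega
          rw [hget0 _ hb1, hget0 j (by omega), if_neg hje]
          split <;> omega
        · have hb2 : (((j:Int) + 1) % m).toNat < m.toNat := by
            have := Int.emod_nonneg ((j:Int) + 1) (by omega : m ≠ 0)
            have := Int.emod_lt_of_pos ((j:Int) + 1) hm'
            omega
          rw [hget0 _ hb2, hget0 j (by omega), if_neg hje]
          split <;> omega
  have hfuel : Bmeas dist0 [1 % m] [] <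
      3 * dist0.foldl (fun a v => a + v.toNat) 0 + 3 := by
    rw [PySem.List.foldl_add_nat]
    unfold Bmeas
    rw [if_neg (by simp)]
    simp only [List.length_cons, List.length_nil]
    omega
  have hFin := B_run m cap hm hcapdef _ dist0 [1 % m] [] hInv0 hfuel
  obtain ⟨hL', hB', hS', hONE', hRel'⟩ := hFin
  set dist' := B_loop m (3 * dist0.foldl (fun a v => a + v.toNat) 0 + 3) dist0 [1 % m] []
    with hdist'
  have hres : B_core m = dget dist' 0 := by rw [hcore]; rfl
  have hcomp := B_complete m cap hm dist' ⟨hL', hB', hS', hONE', hRel'⟩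
  have hzero : dget dist' 0 ≤ cap := by
    have := hcomp m hm
    rw [Int.emod_self] at this
    simpa using this
  constructor
  · have h0len : (0:Nat) < dist'.length := by omega
    obtain ⟨N, hN1, hN2, hN3⟩ := hS' 0 h0len hzero
    exact ⟨N, hN1, by simpa using hN2, by rw [hres]; exact hN3⟩
  · intro N hN1 hN2
    have := hcomp N hN1
    rw [hN2] at this
    rw [hres]
    simpa using this

def A_core (m : Int) : Int :=
  A_loop m
    ((A_init m).1.foldl
        (fun a o => a + (match o with | none => A_sumDigits m | some v => v).toNat) 0
      + (A_init m).2.length + 1)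
    (AState.mk (A_init m).1 (A_init m).2 (A_sumDigits m))

theorem f_eq_core (n : Int) : f n = A_core (A_strip5 (A_strip2 n)) := rfl

theorem A_main (m : Int) (hm : 1 ≤ m) :
    AchievesA m (A_core m) ∧ ∀ N : Int, 1 ≤ N → N % m = 0 → A_core m ≤ A_sumDigits N := by
  have hInv := A_init_inv m hm
  have hfun : (fun (a : Nat) (o : Option Int) =>
      a + (match o with | none => A_sumDigits m | some v => v).toNat) =
      (fun a o => a + wOpt (A_sumDigits m) o) := rfl
  have hmeas : Ameas (A_sumDigits m) (AState.mk (A_init m).1 (A_init m).2 (A_sumDigits m)) <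
      (A_init m).1.foldl
        (fun a o => a + (match o with | none => A_sumDigits m | some v => v).toNat) 0
      + (A_init m).2.length + 1 := by
    rw [hfun, PySem.List.foldl_add_nat]
    unfold Ameas
    dsimp only
    omega
  unfold A_core
  exact A_run m hm _ _ hInv hmeas

-- ===== VERDICT (by name: the statement is the Claim_ definition above) =====
theorem f_spec : Claim_equal_f := by
  intro n _ hpre
  unfold Spec_f
  rw [f_eq_core n, f_alt_eq_core n, strip2_eq, strip5_eq]
  have hm1 : 1 ≤ A_strip5 (A_strip2 n) := strip5_pos _ (strip2_pos n hpre)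
  obtain ⟨hA1, hA2⟩ := A_main _ hm1
  obtain ⟨hB1, hB2⟩ := B_main _ hm1
  obtain ⟨N1, hN11, hN12, hN13⟩ := hA1
  obtain ⟨N2, hN21, hN22, hN23⟩ := hB1
  have h1 := hA2 N2 hN21 hN22
  have h2 := hB2 N1 hN11 hN12
  omega
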